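-- pv_equiv track=rewrite | github.com/hakimrazalee/ICT1002-Programming-Fundamentals | Python/Lab 03/Counting Letters/CountingLetters.py | double_count
-- ===== SOURCE A (Python) =====
-- def double_count(str1, str2):
--     dict = {}
--     differentWords = []
--     wordcountlist = []
--
--     for elements in str1, str2:
--         differentWords.append(elements)
--
--     for x in differentWords:
--         for i in x:
--             wordcountlist.append(i)
--
--     for e in wordcountlist:
--         dict[e] = wordcountlist.count(e)
--
--     return dict
-- ===== SOURCE B (Python) =====
-- def double_count(str1, str2):
--     counts = {}
--     for ch in str1 + str2:
--         counts[ch] = counts.get(ch, 0) + 1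
--     return counts
-- ===== Notes on version B (the rewrite author's own statement) =====
-- stated objective: faster
-- what changed: A rebuilds the char list and calls list.count once per character (a full scan each time); B makes a single pass over str1+str2 incrementing a dict entry per character, which also preserves A's first-appearance key order.
import Mathlib
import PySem

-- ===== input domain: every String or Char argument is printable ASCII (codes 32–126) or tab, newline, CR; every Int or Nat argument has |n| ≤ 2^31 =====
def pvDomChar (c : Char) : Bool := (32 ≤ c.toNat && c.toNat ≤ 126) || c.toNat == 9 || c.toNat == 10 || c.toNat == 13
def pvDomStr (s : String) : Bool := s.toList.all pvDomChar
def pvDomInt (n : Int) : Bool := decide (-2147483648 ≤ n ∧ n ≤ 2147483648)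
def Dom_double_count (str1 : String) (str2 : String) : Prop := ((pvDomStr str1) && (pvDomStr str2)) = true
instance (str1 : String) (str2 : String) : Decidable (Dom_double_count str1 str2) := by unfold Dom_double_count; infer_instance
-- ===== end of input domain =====

-- B replaces A's quadratic repeated list.count scans by one dictionary-increment pass over str1+str2 (objective: faster).

-- ===== PORT A =====
-- A: collect str1, str2 into a list, flatten to a char list, then for each element
-- overwrite dict[e] with wordcountlist.count(e) (a full scan per element).
def double_count (str1 : String) (str2 : String) : List (String × Int) :=
  let differentWords : List String := [str1, str2].foldl (fun acc e => acc ++ [e]) []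
  let wordcountlist : List String :=
    differentWords.foldl (fun acc x => x.toList.foldl (fun acc i => acc ++ [String.ofList [i]]) acc) []
  let d : PySem.Dict String Int :=
    wordcountlist.foldl (fun d e => d.insert e ((PySem.List.count wordcountlist e : Int))) PySem.Dict.empty
  d.items

-- ===== PORT B =====
-- B: one pass over the characters of str1 + str2, incrementing counts.get(ch, 0).
def double_count_alt (str1 : String) (str2 : String) : List (String × Int) :=
  let chars : List String := (str1.toList ++ str2.toList).map (fun c => String.ofList [c])
  let counts : PySem.Dict String Int :=
    chars.foldl (fun d ch => d.insert ch (d.getD ch 0 + 1)) PySem.Dict.empty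
  counts.items

-- ===== PRECONDITION & SPEC =====
def Spec_double_count (str1 : String) (str2 : String) (out : List (String × Int)) : Prop := out = double_count_alt str1 str2
instance (str1 : String) (str2 : String) (out : List (String × Int)) : Decidable (Spec_double_count str1 str2 out) := by unfold Spec_double_count; infer_instance

-- ===== CLAIM (what is proved, stated in full; the proofs are below) =====
def Claim_equal_double_count : Prop := ∀ (str1 : String) (str2 : String), Dom_double_count str1 str2 → Spec_double_count str1 str2 (double_count str1 str2)

-- ===== LEMMAS AND PROOFS =====

-- A's third loop writes a value that depends only on the key: final lookup.
theorem getD_foldl_insert_const (l : List String) (v : String → Int)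
    (d : PySem.Dict String Int) (k : String) :
    (l.foldl (fun d e => d.insert e (v e)) d).getD k 0
      = if k ∈ l then v k else d.getD k 0 := by
  induction l generalizing d with
  | nil => simp
  | cons a l ih =>
      simp only [List.foldl_cons, ih, List.mem_cons]
      by_cases hl : k ∈ l
      · simp [hl]
      · rcases eq_or_ne k a with rfl | hka
        · simp [hl]
        · simp [hl, hka, PySem.Dict.getD_insert]

-- A's dict, as an items list: keys in first-appearance order, each mapped to its count.
theorem items_foldl_insert_count (xs : List String) :
    (xs.foldl (fun d e => d.insert e ((PySem.List.count xs e : Int))) PySem.Dict.empty).items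
      = (PySem.Set.ofList xs).map (fun k => (k, (List.count k xs : Int))) := by
  rw [PySem.Dict.items_eq_map_keys _
        (PySem.Dict.nodup_keys_foldl_insert xs _ _ (by simp)) 0]
  rw [PySem.Dict.keys_foldl_insert, PySem.Dict.keys_empty, PySem.Set.update_nil_left]
  refine List.map_congr_left (fun k hk => ?_)
  have hk' : k ∈ xs := (PySem.Set.mem_ofList xs k).mp hk
  rw [getD_foldl_insert_const xs (fun e => (PySem.List.count xs e : Int))]
  simp [hk', PySem.List.count]

-- ===== VERDICT (by name: the statement is the Claim_ definition above) =====
theorem double_count_spec : Claim_equal_double_count := by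
  intro str1 str2 _
  show double_count str1 str2 = double_count_alt str1 str2
  unfold double_count double_count_alt
  simp only [List.singleton_append, List.foldl_cons, List.foldl_nil, List.nil_append,
    PySem.List.foldl_append_singleton_eq_map]
  rw [items_foldl_insert_count, PySem.Dict.foldl_insert_getD_add_one_eq_counter,
    PySem.Dict.items_counter, List.map_append]
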